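-- pv_equiv track=rewrite | github.com/elessarrr/ports_digital_twin | hk_port_digital_twin/src/scenarios/historical_extractor.py | _identify_low_months
-- ===== SOURCE A (Python) =====
-- from typing import Dict, List, Optional, Tuple
--
-- def _identify_low_months(monthly_patterns: Dict) -> List[int]:
--     """Identify low season months from seasonal patterns"""
--     if not monthly_patterns:
--         return [1, 2, 12]  # Default low months
--
--     # Find months with lowest TEU values
--     month_values = []
--     for month in range(1, 13):
--         total_teu = monthly_patterns.get(month, {}).get('total_teu', 0)
--         month_values.append((month, total_teu))
--
--     # Sort by TEU values and take bottom 3 months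
--     month_values.sort(key=lambda x: x[1])
--     low_months = [month for month, _ in month_values[:3]]
--
--     return sorted(low_months)
-- ===== SOURCE B (Python) =====
-- def _identify_low_months(monthly_patterns):
--     """Identify low season months from seasonal patterns"""
--     if not monthly_patterns:
--         return [1, 2, 12]  # Default low months
--
--     # Selection by repeated extraction: three times, pick the remaining month
--     # with the lowest TEU (min is stable: earliest month wins ties) and remove it.
--     remaining = list(range(1, 13))
--     low = []
--     for _ in range(3):
--         m = min(remaining, key=lambda mo: monthly_patterns.get(mo, {}).get('total_teu', 0))
--         low.append(m)
--         remaining.remove(m)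
--     return sorted(low)
-- ===== Notes on version B (the rewrite author's own statement) =====
-- stated objective: alternative
-- what changed: Replaces building all 12 (month, teu) pairs, fully sorting them and slicing the first 3 with selection by repeated extraction: three passes, each taking the remaining month with the lowest TEU via Python's stable min (earliest month wins ties) and removing it from the candidate list.
import Mathlib
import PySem

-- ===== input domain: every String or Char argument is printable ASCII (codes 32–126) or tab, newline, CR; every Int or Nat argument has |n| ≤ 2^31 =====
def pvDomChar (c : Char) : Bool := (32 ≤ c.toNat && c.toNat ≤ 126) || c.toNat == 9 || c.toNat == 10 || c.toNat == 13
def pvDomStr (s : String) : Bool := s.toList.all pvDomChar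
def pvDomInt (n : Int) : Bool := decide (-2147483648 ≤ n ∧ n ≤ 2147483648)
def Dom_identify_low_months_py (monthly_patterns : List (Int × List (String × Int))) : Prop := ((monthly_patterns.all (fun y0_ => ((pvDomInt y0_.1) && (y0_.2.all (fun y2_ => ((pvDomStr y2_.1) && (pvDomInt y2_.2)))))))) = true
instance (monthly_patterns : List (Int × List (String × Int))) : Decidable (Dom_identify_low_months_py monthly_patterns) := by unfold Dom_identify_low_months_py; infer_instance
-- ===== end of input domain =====

-- B replaces A's build-all/sort-all/slice with selection by repeated extraction:
-- three passes, each taking the stable minimum-TEU month and removing it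
-- (objective: alternative selection algorithm, same result).

-- ===== PORT A =====
-- monthly_patterns.get(month, {}).get('total_teu', 0), shared by both ports
def pvTeu (monthly_patterns : List (Int × List (String × Int))) (month : Int) : Int :=
  PySem.Dict.getD ⟨PySem.Dict.getD ⟨monthly_patterns⟩ month []⟩ "total_teu" 0

def identify_low_months_py (monthly_patterns : List (Int × List (String × Int))) : List Int :=
  if monthly_patterns = [] then [1, 2, 12]
  else
    let month_values := (PySem.List.pyRange 1 13 1).foldl
      (fun acc month => acc ++ [(month, pvTeu monthly_patterns month)]) []
    let sorted_mv := PySem.List.sorted month_values (fun x => x.2) false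
    let low_months := (PySem.List.slice sorted_mv none (some 3)).map (fun x => x.1)
    PySem.List.sorted low_months (fun x => x) false

-- ===== PORT B =====
-- the 'for _ in range(3)' loop of Source B: m = min(remaining, key=teu); low.append(m); remaining.remove(m)
-- (the 'none' branches are totality guards only: min/remove on the 12 distinct months never fail here)
def pvSelect (monthly_patterns : List (Int × List (String × Int))) :
    Nat → List Int → List Int → List Int
  | 0, _, low => low
  | Nat.succ k, remaining, low =>
    match PySem.List.min? remaining (pvTeu monthly_patterns) with
    | none => low
    | some m =>
      match PySem.List.remove? remaining m with
      | none => low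
      | some rest => pvSelect monthly_patterns k rest (low ++ [m])

def identify_low_months_py_alt (monthly_patterns : List (Int × List (String × Int))) : List Int :=
  if monthly_patterns = [] then [1, 2, 12]
  else
    let low := pvSelect monthly_patterns 3 (PySem.List.pyRange 1 13 1) []
    PySem.List.sorted low (fun x => x) false

-- ===== PRECONDITION & SPEC =====
def Spec_identify_low_months_py (monthly_patterns : List (Int × List (String × Int))) (out : List Int) : Prop := out = identify_low_months_py_alt monthly_patterns
instance (monthly_patterns : List (Int × List (String × Int))) (out : List Int) : Decidable (Spec_identify_low_months_py monthly_patterns out) := by unfold Spec_identify_low_months_py; infer_instance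

-- ===== CLAIM (what is proved, stated in full; the proofs are below) =====
def Claim_equal_identify_low_months_py : Prop := ∀ (monthly_patterns : List (Int × List (String × Int))), Dom_identify_low_months_py monthly_patterns → Spec_identify_low_months_py monthly_patterns (identify_low_months_py monthly_patterns)

-- ===== LEMMAS AND PROOFS =====

-- list.remove of a member is List.erase
theorem pv_remove?_of_mem (xs : List Int) (m : Int) (h : m ∈ xs) :
    PySem.List.remove? xs m = some (xs.erase m) := by
  induction xs with
  | nil => cases h
  | cons x t ih =>
    by_cases hx : m = x
    · subst hx; simp [PySem.List.remove?, List.idxOf?, List.findIdx?_cons]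
    · have hmt : m ∈ t := by cases h with | head => exact absurd rfl hx | tail _ h' => exact h'
      have ih' := ih hmt
      simp only [PySem.List.remove?, List.idxOf?] at ih' ⊢
      rw [List.findIdx?_cons]
      have hb : (x == m) = false := beq_eq_false_iff_ne.mpr (Ne.symm hx)
      simp only [hb, Bool.false_eq_true, if_false, cond_false]
      cases hfi : List.findIdx? (fun a => a == m) t with
      | none => rw [hfi] at ih'; simp at ih'
      | some k =>
        rw [hfi] at ih'
        simp only [Option.map_some] at ih' ⊢
        simp [List.erase_cons, Ne.symm hx, List.eraseIdx_cons_succ]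
        exact Option.some.inj ih'

-- one more element on the right updates the running stable minimum
theorem pv_min?_append_one (key : Int → Int) (xs : List Int) (x : Int) :
    PySem.List.min? (xs ++ [x]) key =
      some (match PySem.List.min? xs key with
            | none => x
            | some m => if key x < key m then x else m) := by
  cases h : PySem.List.min? xs key with
  | none =>
    have hx : xs = [] := (PySem.List.min?_eq_none_iff _ _).mp h
    subst hx; rfl
  | some m =>
    unfold PySem.List.min? at h ⊢
    rw [List.foldl_append, h]
    simp only [List.foldl]
    split <;> rfl

-- one more element on the right is one insertion into the sorted list
theorem pv_sorted_append_one (key : Int → Int) (xs : List Int) (x : Int) :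
    PySem.List.sorted (xs ++ [x]) key false =
      PySem.List.insertBy (fun a b => decide (key a < key b)) x (PySem.List.sorted xs key false) := by
  rw [PySem.List.sorted_eq_foldl_insertBy (xs ++ [x]) key,
      PySem.List.sorted_eq_foldl_insertBy xs key, List.foldl_append]
  rfl

-- the stable sort starts with the stable minimum, followed by the sort of the rest
theorem pv_sorted_cons_min (key : Int → Int) (xs : List Int) (m : Int)
    (h : PySem.List.min? xs key = some m) :
    PySem.List.sorted xs key false = m :: PySem.List.sorted (xs.erase m) key false := by
  induction xs using List.reverseRecOn generalizing m with
  | nil => simp [PySem.List.min?] at h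
  | append_singleton ys x ih =>
    rw [pv_min?_append_one] at h
    cases hy : PySem.List.min? ys key with
    | none =>
      have hys : ys = [] := (PySem.List.min?_eq_none_iff _ _).mp hy
      subst hys
      rw [hy] at h
      have hm : m = x := by simpa using h.symm
      subst hm
      simp [List.erase_cons]
      rfl
    | some my =>
      rw [hy] at h
      by_cases hlt : key x < key my
      · simp only [hlt, if_pos] at h
        have hm : m = x := by simpa using h.symm
        subst hm
        have hxys : m ∉ ys := by
          intro hmem
          exact absurd (PySem.List.min?_isMin hy m hmem) (by omega)
        rw [List.erase_append_right _ hxys]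
        simp only [List.erase_cons_head, List.append_nil]
        rw [pv_sorted_append_one]
        cases hs : PySem.List.sorted ys key false with
        | nil => rfl
        | cons hd tl =>
          have hhd : hd ∈ ys := by
            rw [← PySem.List.mem_sorted ys key false]
            rw [hs]; exact List.mem_cons_self
          have : key m < key hd := lt_of_lt_of_le hlt (PySem.List.min?_isMin hy hd hhd)
          simp [PySem.List.insertBy, this]
      · simp only [hlt, if_neg, if_false] at h
        have hm : m = my := by simpa using h.symm
        subst hm
        have hmem : m ∈ ys := PySem.List.min?_mem hy
        rw [List.erase_append_left _ hmem]
        rw [pv_sorted_append_one, pv_sorted_append_one, ih m hy]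
        simp [PySem.List.insertBy, hlt]

-- inserting a mapped element into a mapped list
theorem pv_insertBy_map (f : Int → Int × Int) (key : Int × Int → Int) (x : Int) (ys : List Int) :
    PySem.List.insertBy (fun a b => decide (key a < key b)) (f x) (ys.map f)
      = (PySem.List.insertBy (fun a b => decide (key (f a) < key (f b))) x ys).map f := by
  induction ys with
  | nil => rfl
  | cons y t ih =>
    simp only [List.map_cons, PySem.List.insertBy]
    by_cases hlt : key (f x) < key (f y)
    · simp [hlt]
    · simp [hlt, ih]

theorem pv_sorted_map_aux (f : Int → Int × Int) (key : Int × Int → Int)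
    (xs : List Int) (ys : List Int) :
    xs.foldl (fun acc x => PySem.List.insertBy (fun a b => decide (key a < key b)) (f x) acc) (ys.map f)
      = (xs.foldl (fun acc x => PySem.List.insertBy (fun a b => decide (key (f a) < key (f b))) x acc) ys).map f := by
  induction xs generalizing ys with
  | nil => rfl
  | cons x t ih =>
    simp only [List.foldl]
    rw [pv_insertBy_map, ih]

-- sorting a mapped list is mapping the sorted originals (same stable order)
theorem pv_sorted_map (f : Int → Int × Int) (key : Int × Int → Int) (xs : List Int) :
    PySem.List.sorted (xs.map f) key false
      = (PySem.List.sorted xs (fun x => key (f x)) false).map f := by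
  rw [PySem.List.sorted_eq_foldl_insertBy (xs.map f) key,
      PySem.List.sorted_eq_foldl_insertBy xs (fun x => key (f x)), List.foldl_map]
  simpa using pv_sorted_map_aux f key xs []

-- building a list by appending singletons is map
theorem pv_foldl_append_eq_map (l : List Int) (f : Int → Int × Int) (acc : List (Int × Int)) :
    l.foldl (fun acc x => acc ++ [f x]) acc = acc ++ l.map f := by
  induction l generalizing acc with
  | nil => simp
  | cons x t ih => simp [List.foldl, ih]

-- the extraction loop produces exactly the k-prefix of the stable sort
theorem pv_select_eq (mp : List (Int × List (String × Int))) (k : Nat) (xs : List Int)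
    (low : List Int) (hk : k ≤ xs.length) :
    pvSelect mp k xs low = low ++ (PySem.List.sorted xs (pvTeu mp) false).take k := by
  induction k generalizing xs low with
  | zero => simp [pvSelect]
  | succ k ih =>
    cases hmin : PySem.List.min? xs (pvTeu mp) with
    | none =>
      have : xs = [] := (PySem.List.min?_eq_none_iff _ _).mp hmin
      subst this; simp at hk
    | some m =>
      have hmem : m ∈ xs := PySem.List.min?_mem hmin
      have hrem := pv_remove?_of_mem xs m hmem
      have hlen : (xs.erase m).length = xs.length - 1 := List.length_erase_of_mem hmem
      have hk' : k ≤ (xs.erase m).length := by omega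
      simp only [pvSelect, hmin, hrem]
      rw [ih (xs.erase m) (low ++ [m]) hk']
      rw [pv_sorted_cons_min (pvTeu mp) xs m hmin]
      simp

-- ===== VERDICT (by name: the statement is the Claim_ definition above) =====
theorem identify_low_months_py_spec : Claim_equal_identify_low_months_py := by
  intro mp _
  unfold Spec_identify_low_months_py identify_low_months_py identify_low_months_py_alt
  by_cases h : mp = []
  · simp [h]
  · simp only [h, if_false]
    rw [pv_foldl_append_eq_map _ _ [], List.nil_append]
    rw [pv_sorted_map (fun m => (m, pvTeu mp m)) (fun x => x.2) (PySem.List.pyRange 1 13 1)]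
    rw [PySem.List.slice_to _ (by norm_num)]
    rw [← List.map_take, List.map_map]
    have h1 : ((fun x : Int × Int => x.1) ∘ (fun m : Int => (m, pvTeu mp m))) = fun m : Int => m := rfl
    rw [h1, List.map_id']
    rw [pv_select_eq mp 3 (PySem.List.pyRange 1 13 1) [] (by decide), List.nil_append]
    rfl
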